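-- pv_equiv track=rewrite | github.com/siikamiika/gadne | modules/covfefe.py | covfefe
-- ===== SOURCE A (Python) =====
-- VOWELS = 'aeiouyäö'
--
-- TOGGLE_VOICED = {
--     # unvoiced --> voiced
--     'c': 'g',
--     'f': 'v',
--     'k': 'g',
--     'p': 'b',
--     's': 'z',
--     't': 'd',
--     # voiced --> unvoiced
--     'g': 'k',
--     'v': 'f',
--     'b': 'p',
--     'z': 's',
--     'd': 't',
-- }
--
-- def covfefe(word):
--     output = []
--
--     first_vowel = None
--     last_consonant = None
--     previous_vowel = None
--     repeat_vowel = None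
--     stop = False
--
--     for c in word:
--         if not stop:
--             output.append(c)
--
--         if c.lower() in VOWELS:
--             previous_vowel = c
--             if not first_vowel:
--                 first_vowel = c
--             elif last_consonant:
--                 repeat_vowel = c
--                 break
--         else:
--             if first_vowel and not last_consonant:
--                 last_consonant = c
--                 stop = True
--
--     if not last_consonant:
--         return word
--
--     repeat_consonant = TOGGLE_VOICED.get(last_consonant.lower()) or last_consonant
--     if last_consonant.isupper():
--         repeat_consonant = repeat_consonant.upper()
--     output.append((repeat_consonant + (repeat_vowel or previous_vowel))*2)
--
--     return ''.join(output)
-- ===== SOURCE B (Python) =====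
-- VOWELS = 'aeiouyäö'
--
-- TOGGLE_VOICED = {
--     'c': 'g', 'f': 'v', 'k': 'g', 'p': 'b', 's': 'z', 't': 'd',
--     'g': 'k', 'v': 'f', 'b': 'p', 'z': 's', 'd': 't',
-- }
--
--
-- def _is_vowel(c):
--     return c.lower() in VOWELS
--
--
-- def _split_at(pred, cs):
--     """cs split at the first position whose char fails pred."""
--     k = 0
--     while k < len(cs) and pred(cs[k]):
--         k += 1
--     return cs[:k], cs[k:]
--
--
-- def covfefe(word):
--     pre, rest = _split_at(lambda c: not _is_vowel(c), word)
--     vows, after = _split_at(_is_vowel, rest)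
--     if not vows or not after:
--         return word
--     cons = after[0]
--     rc = TOGGLE_VOICED.get(cons.lower(), cons)
--     if cons.isupper():
--         rc = rc.upper()
--     rv = next((c for c in after[1:] if _is_vowel(c)), vows[-1])
--     return pre + vows + cons + (rc + rv) * 2
-- ===== Notes on version B (the rewrite author's own statement) =====
-- stated objective: simpler
-- what changed: A's single pass with five mutable state variables and a break is replaced by a declarative decomposition: span off the consonant prefix, span off the vowel run, take the first consonant after it, search the tail for the repeat vowel (falling back to the last vowel of the run), and rebuild the word from those pieces.
import Mathlib
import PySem

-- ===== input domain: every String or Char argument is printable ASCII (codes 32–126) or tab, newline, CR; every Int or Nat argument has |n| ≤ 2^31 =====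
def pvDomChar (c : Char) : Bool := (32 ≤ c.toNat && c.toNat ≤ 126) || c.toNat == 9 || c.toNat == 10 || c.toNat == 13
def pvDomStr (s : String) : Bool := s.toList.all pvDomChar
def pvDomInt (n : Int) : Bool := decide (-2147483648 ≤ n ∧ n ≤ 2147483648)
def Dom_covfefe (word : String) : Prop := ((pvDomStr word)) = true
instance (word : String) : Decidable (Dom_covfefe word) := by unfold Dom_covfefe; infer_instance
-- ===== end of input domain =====

-- B re-decomposes A's one-pass state machine into span (prefix / vowel-run) splits plus a
-- direct first-vowel search; objective: simpler, not faster. Proved equal on all of Dom.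

-- shared module constants of both sources: VOWELS and TOGGLE_VOICED
def vowelsL : List Char := ['a', 'e', 'i', 'o', 'u', 'y', 'ä', 'ö']

def toggleVoiced? (c : Char) : Option Char :=
  match c with
  | 'c' => some 'g' | 'f' => some 'v' | 'k' => some 'g' | 'p' => some 'b'
  | 's' => some 'z' | 't' => some 'd' | 'g' => some 'k' | 'v' => some 'f'
  | 'b' => some 'p' | 'z' => some 's' | 'd' => some 't'
  | _ => none

-- c.lower() in VOWELS (single characters, so substring test = membership)
def isVowel (c : Char) : Bool := vowelsL.contains (PySem.Chars.lowerChar c)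

-- ===== PORT A =====
-- the for-loop of A with its five state variables; the `break` returns directly
def covfefeLoop (cs out : List Char) (fv lc pv rv : Option Char) (stop : Bool) :
    List Char × Option Char × Option Char × Option Char × Option Char :=
  match cs with
  | [] => (out, fv, lc, pv, rv)
  | c :: rest =>
    let out := if stop then out else out ++ [c]
    if isVowel c then
      if fv.isNone then covfefeLoop rest out (some c) lc (some c) rv stop
      else if lc.isSome then (out, fv, lc, some c, some c)   -- break
      else covfefeLoop rest out fv lc (some c) rv stop
    else
      if fv.isSome && lc.isNone then covfefeLoop rest out fv (some c) pv rv true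
      else covfefeLoop rest out fv lc pv rv stop

def covfefe (word : String) : String :=
  match covfefeLoop word.toList [] none none none none false with
  | (out, _fv, lc, pv, rv) =>
    match lc with
    | none => word
    | some l =>
      let rc := (toggleVoiced? (PySem.Chars.lowerChar l)).getD l  -- .get(...) or last_consonant
      let rc := if PySem.Chars.isupper l then PySem.Chars.upperChar rc else rc
      -- repeat_vowel or previous_vowel (previous_vowel is always set here; default unreachable)
      let v := rv.getD (pv.getD l)
      String.ofList (out ++ ([rc, v] ++ [rc, v]))

-- ===== PORT B =====
-- the while loop of _split_at: k = length of the longest prefix satisfying pred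
def splitIdx (p : Char → Bool) (cs : List Char) : Nat :=
  match cs with
  | [] => 0
  | c :: rest => if p c then splitIdx p rest + 1 else 0

-- _split_at of Source B: the two slices cs[:k], cs[k:]
def spanB (p : Char → Bool) (cs : List Char) : List Char × List Char :=
  (cs.take (splitIdx p cs), cs.drop (splitIdx p cs))

def covfefe_alt (word : String) : String :=
  match spanB (fun c => !isVowel c) word.toList with
  | (pre, rest) =>
    match spanB isVowel rest with
    | (vows, after) =>
      match vows, after with
      | [], _ => word
      | _ :: _, [] => word
      | v0 :: vtail, cons :: tailAfter =>
        let rc := (toggleVoiced? (PySem.Chars.lowerChar cons)).getD cons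
        let rc := if PySem.Chars.isupper cons then PySem.Chars.upperChar rc else rc
        let rv := (tailAfter.find? isVowel).getD (vtail.getLastD v0)  -- next(…, vows[-1])
        String.ofList ((pre ++ (v0 :: vtail) ++ [cons]) ++ ([rc, rv] ++ [rc, rv]))

-- ===== PRECONDITION & SPEC =====
def Spec_covfefe (word : String) (out : String) : Prop := out = covfefe_alt word
instance (word : String) (out : String) : Decidable (Spec_covfefe word out) := by unfold Spec_covfefe; infer_instance

-- ===== CLAIM (what is proved, stated in full; the proofs are below) =====
def Claim_equal_covfefe : Prop := ∀ (word : String), Dom_covfefe word → Spec_covfefe word (covfefe word)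

-- ===== LEMMAS AND PROOFS =====

lemma spanB_append (p : Char → Bool) (cs : List Char) :
    (spanB p cs).1 ++ (spanB p cs).2 = cs := by
  simp [spanB]

lemma spanB_mem (p : Char → Bool) (cs : List Char) :
    ∀ c ∈ (spanB p cs).1, p c = true := by
  induction cs with
  | nil => simp [spanB, splitIdx]
  | cons c rest ih =>
    by_cases h : p c = true <;> simp [spanB, splitIdx, h]
    intro x hx
    exact ih x (by simpa [spanB] using hx)

lemma spanB_head (p : Char → Bool) (cs : List Char) (r : Char) (rs : List Char)
    (h : (spanB p cs).2 = r :: rs) : p r = false := by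
  induction cs with
  | nil => simp [spanB, splitIdx] at h
  | cons c rest ih =>
    by_cases hp : p c = true
    · simp [spanB, splitIdx, hp] at h
      exact ih (by simpa [spanB] using h)
    · simp [spanB, splitIdx, hp] at h
      simpa [← h.1] using hp

-- phase 1: the leading consonants are appended and the state is unchanged
lemma loop_phase1 (pre rest out : List Char) (h : ∀ c ∈ pre, isVowel c = false) :
    covfefeLoop (pre ++ rest) out none none none none false
      = covfefeLoop rest (out ++ pre) none none none none false := by
  induction pre generalizing out with
  | nil => simp
  | cons c pre ih =>
    have hc : isVowel c = false := h c (by simp)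
    have hrest : ∀ x ∈ pre, isVowel x = false := fun x hx => h x (by simp [hx])
    simp only [List.cons_append, covfefeLoop, hc]
    simpa [List.append_assoc] using ih (out ++ [c]) hrest

-- phase 2: a vowel run is appended, previous_vowel tracks its last element
lemma loop_phase2 (vs rest out : List Char) (f p : Char) (h : ∀ c ∈ vs, isVowel c = true) :
    covfefeLoop (vs ++ rest) out (some f) none (some p) none false
      = covfefeLoop rest (out ++ vs) (some f) none (some (vs.getLastD p)) none false := by
  induction vs generalizing out p with
  | nil => simp
  | cons c vs ih =>
    have hc : isVowel c = true := h c (by simp)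
    have hrest : ∀ x ∈ vs, isVowel x = true := fun x hx => h x (by simp [hx])
    simp only [List.cons_append, covfefeLoop, hc, if_pos, Option.isNone_some,
      Bool.false_eq_true, if_false, Option.isSome_none]
    rw [List.getLastD_cons]
    simpa [List.append_assoc] using ih (out ++ [c]) c hrest

-- phase 3 (after the consonant, stop = True): scan for the next vowel
lemma loop_phase3 (rest out : List Char) (f l p : Char) :
    covfefeLoop rest out (some f) (some l) (some p) none true
      = (out, some f, some l, some ((rest.find? isVowel).getD p), rest.find? isVowel) := by
  induction rest with
  | nil => simp [covfefeLoop]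
  | cons c rest ih =>
    by_cases hc : isVowel c = true
    · simp [covfefeLoop, hc, List.find?]
    · simp [covfefeLoop, hc, List.find?, ih]

-- spanB on a head that satisfies p peels it off
lemma spanB_cons_pos (p : Char → Bool) (c : Char) (cs : List Char) (h : p c = true) :
    spanB p (c :: cs) = (c :: (spanB p cs).1, (spanB p cs).2) := by
  simp [spanB, splitIdx, h]

-- ===== VERDICT (by name: the statement is the Claim_ definition above) =====
theorem covfefe_spec : Claim_equal_covfefe := by
  intro word _dom
  unfold Spec_covfefe covfefe covfefe_alt
  rcases hsp : spanB (fun c => !isVowel c) word.toList with ⟨pre, rest⟩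
  have hpre : ∀ c ∈ pre, isVowel c = false := by
    intro c hc
    have := spanB_mem (fun c => !isVowel c) word.toList c (by rw [hsp]; exact hc)
    simpa using this
  have hcat : pre ++ rest = word.toList := by
    have := spanB_append (fun c => !isVowel c) word.toList
    rwa [hsp] at this
  rcases hrest : rest with _ | ⟨r0, rest'⟩
  · -- no vowel at all: both return word
    have hA : covfefeLoop word.toList [] none none none none false
        = (pre, none, none, none, none) := by
      rw [← hcat, hrest]
      simpa using loop_phase1 pre [] [] hpre
    rw [hA]
    simp [spanB, splitIdx]
  · have hr0 : isVowel r0 = true := by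
      have := spanB_head (fun c => !isVowel c) word.toList r0 rest' (by rw [hsp, hrest])
      simpa using this
    rcases hsp2 : spanB isVowel rest' with ⟨a, after⟩
    have hsp2' : spanB isVowel (r0 :: rest') = (r0 :: a, after) := by
      rw [spanB_cons_pos isVowel r0 rest' hr0, hsp2]
    simp only [hsp2']
    have ha : ∀ c ∈ a, isVowel c = true := by
      intro c hc
      exact spanB_mem isVowel rest' c (by rw [hsp2]; exact hc)
    have hcat2 : a ++ after = rest' := by
      have := spanB_append isVowel rest'
      rwa [hsp2] at this
    have hstep2 : covfefeLoop word.toList [] none none none none false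
        = covfefeLoop after (pre ++ [r0] ++ a) (some r0) none (some (a.getLastD r0)) none false := by
      rw [← hcat, hrest, loop_phase1 pre (r0 :: rest') [] hpre]
      have h1 : covfefeLoop (r0 :: rest') ([] ++ pre) none none none none false
          = covfefeLoop rest' (pre ++ [r0]) (some r0) none (some r0) none false := by
        simp [covfefeLoop, hr0]
      rw [h1, ← hcat2]
      exact loop_phase2 a after (pre ++ [r0]) r0 r0 ha
    rcases hafter : after with _ | ⟨cons, tailAfter⟩
    · -- vowels to the end, no consonant after: both return word
      rw [hafter] at hstep2
      simp only [covfefeLoop] at hstep2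
      rw [hstep2]
    · have hcons : isVowel cons = false := by
        have := spanB_head isVowel rest' cons tailAfter (by rw [hsp2, hafter])
        simpa using this
      rw [hafter] at hstep2
      have hstep3 : covfefeLoop word.toList [] none none none none false
          = (pre ++ [r0] ++ a ++ [cons], some r0, some cons,
              some ((tailAfter.find? isVowel).getD (a.getLastD r0)), tailAfter.find? isVowel) := by
        rw [hstep2]
        simp only [covfefeLoop, hcons, Bool.false_eq_true, if_false, Option.isSome_some,
          Option.isNone_some]
        exact loop_phase3 tailAfter (pre ++ [r0] ++ a ++ [cons]) r0 cons (a.getLastD r0)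
      rw [hstep3]
      rcases hf : tailAfter.find? isVowel with _ | v <;>
        simp [hf, List.getLastD, List.append_assoc]
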